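-- pv_equiv track=rewrite | github.com/n7tms/AOC | AOC2024/25.py | calc_pins_lock
-- ===== SOURCE A (Python) =====
-- def calc_pins_lock(lock: list) -> list:
--     pins = [0]*5
--
--     for c in range(len(lock[0])):
--         for r in range(len(lock)):
--             if r == 0: continue
--             if lock[r][c] == '.':
--                 pins[c] = r - 1
--                 break
--     return pins
-- ===== SOURCE B (Python) =====
-- def calc_pins_lock(lock: list) -> list:
--     pins = [0] * 5
--     width = len(lock[0])
--     resolved = [False] * width
--     for r in range(1, len(lock)):
--         row = lock[r]
--         for c in range(width):
--             if not resolved[c] and row[c] == '.':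
--                 pins[c] = r - 1
--                 resolved[c] = True
--     return pins
-- ===== Notes on version B (the rewrite author's own statement) =====
-- stated objective: alternative
-- what changed: Replaced the column-major scan with an inner break by a single row-major top-down pass that maintains a boolean 'resolved' flag per column, recording pins[c]=r-1 at the first '.' seen in each column.
import Mathlib
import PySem

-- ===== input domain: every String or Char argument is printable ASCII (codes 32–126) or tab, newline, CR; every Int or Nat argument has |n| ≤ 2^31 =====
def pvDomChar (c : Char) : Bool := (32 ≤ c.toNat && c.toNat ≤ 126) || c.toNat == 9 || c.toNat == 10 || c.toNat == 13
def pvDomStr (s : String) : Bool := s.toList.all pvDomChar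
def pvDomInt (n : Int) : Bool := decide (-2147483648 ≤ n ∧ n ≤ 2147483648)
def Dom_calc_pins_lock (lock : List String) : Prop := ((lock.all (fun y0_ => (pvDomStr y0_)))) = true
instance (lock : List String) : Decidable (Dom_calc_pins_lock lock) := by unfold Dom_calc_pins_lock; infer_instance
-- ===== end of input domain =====

-- B replaces A's column-major scan (inner loop with break) by a single row-major
-- top-down pass maintaining a per-column 'resolved' flag; same cost, alternative algorithm.


-- ===== PORT A =====
-- inner loop 'for r in range(len(lock)): if r == 0: continue; if lock[r][c] == '.': pins[c] = r-1; break'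
-- (out-of-range reads default to ' '/""; within Pre_ every read the Python performs is in range, so the port is exact there)
def pvAFindRow (lock : List String) (c : Int) : List Int → Option Int
  | [] => none
  | r :: rest =>
    if r == 0 then pvAFindRow lock c rest
    else if ((PySem.Str.pyGet? ((PySem.List.pyGet? lock r).getD "") c).getD ' ') == '.' then
      some (r - 1)
    else pvAFindRow lock c rest

def calc_pins_lock (lock : List String) : List Int :=
  (PySem.List.pyRange 0 (PySem.Str.len ((PySem.List.pyGet? lock 0).getD "")) 1).foldl
    (fun pins c =>
      match pvAFindRow lock c (PySem.List.pyRange 0 (Int.ofNat lock.length) 1) with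
      | some v => pins.set c.toNat v
      | none => pins)
    (List.replicate 5 0)

-- ===== PORT B =====
-- row-major pass: state is (pins, resolved); pins[c] = r-1 at the first '.' of column c
def calc_pins_lock_alt (lock : List String) : List Int :=
  let width := PySem.Str.len ((PySem.List.pyGet? lock 0).getD "")
  let st :=
    (PySem.List.pyRange 1 (Int.ofNat lock.length) 1).foldl
      (fun (st : List Int × List Bool) r =>
        let row := (PySem.List.pyGet? lock r).getD ""
        (PySem.List.pyRange 0 width 1).foldl
          (fun (st : List Int × List Bool) c =>
            if !(st.2.getD c.toNat false) && (((PySem.Str.pyGet? row c).getD ' ') == '.') then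
              (st.1.set c.toNat (r - 1), st.2.set c.toNat true)
            else st)
          st)
      (List.replicate 5 0, List.replicate width.toNat false)
  st.1

-- ===== PRECONDITION & SPEC =====
-- character of lock at row r, column c, with ' ' outside the grid (used by Pre_ and the proofs)
def pvChr (lock : List String) (r c : Nat) : Char := ((lock.getD r "").toList.getD c ' ')

-- Pre_ is exactly the set of inputs on which the Python A returns: lock is nonempty, and for each
-- column c of lock[0], every row the scan reaches before the column's first '.' is longer than c
-- (else lock[r][c] raises IndexError), and a column that does resolve has c < 5
-- (else pins[c] = r - 1 raises IndexError).
def Pre_calc_pins_lock (lock : List String) : Prop :=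
  lock ≠ [] ∧
  ∀ c ∈ List.range (lock.getD 0 "").toList.length,
  ∀ r ∈ List.range lock.length, 1 ≤ r →
    (∀ r' ∈ List.range r, 1 ≤ r' → c < (lock.getD r' "").toList.length ∧ pvChr lock r' c ≠ '.') →
    (c < (lock.getD r "").toList.length ∧ (pvChr lock r c = '.' → c < 5))

instance (lock : List String) : Decidable (Pre_calc_pins_lock lock) := by
  unfold Pre_calc_pins_lock; infer_instance

def pvWitness_calc_pins_lock : List String := ["#####", "##.##", "....#"]

def Spec_calc_pins_lock (lock : List String) (out : List Int) : Prop := out = calc_pins_lock_alt lock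
instance (lock : List String) (out : List Int) : Decidable (Spec_calc_pins_lock lock out) := by unfold Spec_calc_pins_lock; infer_instance

-- ===== CLAIM (what is proved, stated in full; the proofs are below) =====
def Claim_equal_calc_pins_lock : Prop := ∀ (lock : List String), Dom_calc_pins_lock lock → Pre_calc_pins_lock lock → Spec_calc_pins_lock lock (calc_pins_lock lock)

-- ===== LEMMAS AND PROOFS =====
-- (the two ports are in fact equal on EVERY input; the proofs below do not use Pre_, which only
--  delimits where port A is exact for the Python original)

-- first row r' among r, r+1, …, r+k-1 whose column-c character is '.'
def pvFindDot (lock : List String) (c : Nat) : Nat → Nat → Option Nat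
  | _, 0 => none
  | r, k+1 => if pvChr lock r c = '.' then some r else pvFindDot lock c (r+1) k

-- the per-column value both ports compute (m rows scanned, starting at row 1)
def pvPinVal (lock : List String) (W i m : Nat) : Int :=
  if i < W then
    match pvFindDot lock i 1 m with
    | some v => (v : Int) - 1
    | none => 0
  else 0

-- the common column-major normal form both ports are reduced to
def pvSpecFold (lock : List String) : List Int :=
  (List.range ((lock.getD 0 "").toList.length)).foldl
    (fun pins c =>
      match pvFindDot lock c 1 (lock.length - 1) with
      | some v => pins.set c ((v : Int) - 1)
      | none => pins)
    (List.replicate 5 0)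

theorem pv_getD_set_self {α : Type} (l : List α) (i : Nat) (v d : α) (h : i < l.length) :
    (l.set i v).getD i d = v := by
  simp [List.getD_eq_getElem?_getD, List.getElem?_set_self h]

theorem pv_getD_set_ne {α : Type} (l : List α) (i j : Nat) (v d : α) (h : i ≠ j) :
    (l.set i v).getD j d = l.getD j d := by
  simp [List.getD_eq_getElem?_getD, List.getElem?_set_ne h]

theorem pvFindDot_succ (lock : List String) (c r k : Nat) :
    pvFindDot lock c r (k+1) =
      match pvFindDot lock c r k with
      | some v => some v
      | none => if pvChr lock (r+k) c = '.' then some (r+k) else none := by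
  induction k generalizing r with
  | zero => simp [pvFindDot]
  | succ k ih =>
    rw [pvFindDot]
    by_cases h : pvChr lock r c = '.'
    · simp [pvFindDot, h]
    · rw [ih (r+1)]
      simp only [pvFindDot, if_neg h]
      have : r + 1 + k = r + (k + 1) := by omega
      rw [this]

theorem pvAFindRow_eq (lock : List String) (c : Nat) (k : Nat) :
    ∀ r : Nat, 1 ≤ r →
      pvAFindRow lock (c : Int) (PySem.List.pyRange (r : Int) ((r + k : Nat) : Int) 1) =
        (pvFindDot lock c r k).map (fun v => (v : Int) - 1) := by
  induction k with
  | zero =>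
    intro r _
    rw [PySem.List.pyRange_one_eq_nil (by push_cast; omega)]
    simp [pvAFindRow, pvFindDot]
  | succ k ih =>
    intro r hr
    rw [PySem.List.pyRange_one_cons (by push_cast; omega)]
    rw [pvAFindRow]
    have hr0 : ((r : Int) == 0) = false := by simp; omega
    rw [hr0]
    simp only [Bool.false_eq_true, if_false]
    have hchr : ((PySem.Str.pyGet? ((PySem.List.pyGet? lock (r : Int)).getD "") (c : Int)).getD ' ')
        = pvChr lock r c := by
      simp [PySem.List.pyGet?_natCast, pvChr, List.getD_eq_getElem?_getD]
    rw [hchr]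
    by_cases h : pvChr lock r c = '.'
    · rw [pvFindDot]
      simp [h]
    · have hbeq : (pvChr lock r c == '.') = false := by simp [h]
      rw [hbeq]
      simp only [Bool.false_eq_true, if_false]
      have h1 : (r : Int) + 1 = ((r + 1 : Nat) : Int) := by push_cast; ring
      have h2 : ((r + (k + 1) : Nat) : Int) = (((r + 1) + k : Nat) : Int) := by push_cast; ring
      rw [h1, h2, ih (r+1) (by omega)]
      rw [pvFindDot]
      simp [h]

theorem pvAFindRow_top (lock : List String) (c : Nat) :
    pvAFindRow lock (c : Int) (PySem.List.pyRange 0 (Int.ofNat lock.length) 1) =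
      (pvFindDot lock c 1 (lock.length - 1)).map (fun v => (v : Int) - 1) := by
  rcases Nat.eq_zero_or_pos lock.length with hn | hn
  · rw [hn]
    rw [PySem.List.pyRange_one_eq_nil (by simp)]
    simp [pvAFindRow, pvFindDot]
  · rw [PySem.List.pyRange_one_cons (by simp; omega)]
    rw [pvAFindRow]
    simp only [BEq.rfl, if_true]
    have h1 : (0 : Int) + 1 = ((1 : Nat) : Int) := by norm_num
    have h2 : (Int.ofNat lock.length) = ((1 + (lock.length - 1) : Nat) : Int) := by
      simp [Int.ofNat_eq_natCast]; omega
    rw [h1, h2, pvAFindRow_eq lock c (lock.length - 1) 1 (by omega)]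

theorem calc_pins_lock_eq_spec (lock : List String) : calc_pins_lock lock = pvSpecFold lock := by
  unfold calc_pins_lock pvSpecFold
  have hs : ((PySem.List.pyGet? lock 0).getD "") = lock.getD 0 "" := by
    simp [PySem.List.pyGet?_zero, List.getD_eq_getElem?_getD]
  rw [hs, PySem.Str.len_eq, PySem.List.pyRange_zero_natCast, List.foldl_map]
  apply PySem.List.foldl_congr_mem
  intro pins c _
  rw [pvAFindRow_top]
  cases pvFindDot lock c 1 (lock.length - 1) with
  | none => rfl
  | some v => simp

-- ===== B-side =====

-- Nat-indexed form of B's inner-loop body (value (r:Int)-1 at row r)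
def pvStepB (lock : List String) (r : Nat) (st : List Int × List Bool) (c : Nat) :
    List Int × List Bool :=
  if !(st.2.getD c false) && (pvChr lock r c == '.') then
    (st.1.set c ((r : Int) - 1), st.2.set c true)
  else st

-- invariant after scanning rows 1..m
def pvInv (lock : List String) (W m : Nat) (st : List Int × List Bool) : Prop :=
  st.1.length = 5 ∧ st.2.length = W ∧
  (∀ c, c < W → st.2.getD c false = (pvFindDot lock c 1 m).isSome) ∧
  (∀ i, i < 5 → st.1.getD i 0 = pvPinVal lock W i m)

theorem pvStepB_row (lock : List String) (W m : Nat) (st : List Int × List Bool)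
    (h : pvInv lock W m st) :
    ∀ j, j ≤ W →
      (let st' := (List.range j).foldl (pvStepB lock (1 + m)) st
       st'.1.length = 5 ∧ st'.2.length = W ∧
       (∀ c, c < W → st'.2.getD c false =
          (pvFindDot lock c 1 (if c < j then m + 1 else m)).isSome) ∧
       (∀ i, i < 5 → st'.1.getD i 0 =
          if i < j then pvPinVal lock W i (m + 1) else pvPinVal lock W i m)) := by
  intro j
  induction j with
  | zero =>
    intro _
    simpa [pvInv] using h
  | succ j ih =>
    intro hj
    have ihj := ih (by omega)
    simp only [List.range_succ, List.foldl_append, List.foldl_cons, List.foldl_nil] at *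
    obtain ⟨hl1, hl2, hres, hpin⟩ := ihj
    set st' := (List.range j).foldl (pvStepB lock (1 + m)) st with hst'
    have hresj : st'.2.getD j false = (pvFindDot lock j 1 m).isSome := by
      rw [hres j (by omega)]; simp
    have hsucc := pvFindDot_succ lock j 1 m
    unfold pvStepB
    by_cases hb : st'.2.getD j false = true
    · -- column already resolved: skip; the first dot is unchanged
      rw [hb]
      simp only [Bool.not_true, Bool.false_and, Bool.false_eq_true, if_false]
      have hvs : (pvFindDot lock j 1 m).isSome = true := by rw [← hresj]; exact hb
      obtain ⟨v, hv⟩ := Option.isSome_iff_exists.mp hvs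
      refine ⟨hl1, hl2, ?_, ?_⟩
      · intro c hc
        rcases Nat.lt_trichotomy c j with h1 | h1 | h1
        · rw [hres c hc]; simp [h1, Nat.lt_succ_of_lt h1]
        · rw [h1, hres j (h1 ▸ hc)]
          simp [hsucc, hv]
        · have h2 : ¬ c < j := by omega
          have h3 : ¬ c < j + 1 := by omega
          rw [hres c hc]; simp [h2, h3]
      · intro i hi
        rcases Nat.lt_trichotomy i j with h1 | h1 | h1
        · rw [hpin i hi]; simp [h1, Nat.lt_succ_of_lt h1]
        · rw [h1, hpin j (h1 ▸ hi)]
          simp [pvPinVal, hsucc, hv]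
        · have h2 : ¬ i < j := by omega
          have h3 : ¬ i < j + 1 := by omega
          rw [hpin i hi]; simp [h2, h3]
    · -- not yet resolved
      have hbf : st'.2.getD j false = false := by
        cases hx : st'.2.getD j false
        · rfl
        · exact absurd hx hb
      have hnone : pvFindDot lock j 1 m = none := by
        have hvs := hresj; rw [hbf] at hvs
        cases hx : pvFindDot lock j 1 m
        · rfl
        · rw [hx] at hvs; simp at hvs
      rw [hbf]
      by_cases hchr : pvChr lock (1 + m) j = '.'
      · -- the column resolves now, at row 1 + m
        simp only [hchr, Bool.not_false, Bool.true_and, beq_self_eq_true, if_true]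
        have hdot : pvFindDot lock j 1 (m + 1) = some (1 + m) := by
          rw [hsucc, hnone]; simp [hchr]
        refine ⟨by simp [hl1], by simp [hl2], ?_, ?_⟩
        · intro c hc
          rcases Nat.lt_trichotomy c j with h1 | h1 | h1
          · rw [pv_getD_set_ne _ _ _ _ _ (by omega), hres c hc]
            simp [h1, Nat.lt_succ_of_lt h1]
          · rw [h1, pv_getD_set_self _ _ _ _ (by omega : j < st'.2.length)]
            simp [hdot]
          · rw [pv_getD_set_ne _ _ _ _ _ (by omega), hres c hc]
            have h2 : ¬ c < j := by omega
            have h3 : ¬ c < j + 1 := by omega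
            simp [h2, h3]
        · intro i hi
          rcases Nat.lt_trichotomy i j with h1 | h1 | h1
          · rw [pv_getD_set_ne _ _ _ _ _ (by omega), hpin i hi]
            simp [h1, Nat.lt_succ_of_lt h1]
          · have hjW : j < W := by omega
            rw [h1, pv_getD_set_self _ _ _ _ (by omega : j < st'.1.length)]
            simp [pvPinVal, hdot, hjW]
          · rw [pv_getD_set_ne _ _ _ _ _ (by omega), hpin i hi]
            have h2 : ¬ i < j := by omega
            have h3 : ¬ i < j + 1 := by omega
            simp [h2, h3]
      · -- no dot at this row either
        have hbeq : (pvChr lock (1 + m) j == '.') = false := by simp [hchr]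
        simp only [hbeq, Bool.and_false, Bool.false_eq_true, if_false]
        have hdot : pvFindDot lock j 1 (m + 1) = none := by
          rw [hsucc, hnone]; simp [hchr]
        refine ⟨hl1, hl2, ?_, ?_⟩
        · intro c hc
          rcases Nat.lt_trichotomy c j with h1 | h1 | h1
          · rw [hres c hc]; simp [h1, Nat.lt_succ_of_lt h1]
          · rw [h1, hres j (h1 ▸ hc)]
            simp [hnone, hdot]
          · have h2 : ¬ c < j := by omega
            have h3 : ¬ c < j + 1 := by omega
            rw [hres c hc]; simp [h2, h3]
        · intro i hi
          rcases Nat.lt_trichotomy i j with h1 | h1 | h1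
          · rw [hpin i hi]; simp [h1, Nat.lt_succ_of_lt h1]
          · rw [h1, hpin j (h1 ▸ hi)]
            simp [pvPinVal, hnone, hdot]
          · rw [hpin i hi]
            have h2 : ¬ i < j := by omega
            have h3 : ¬ i < j + 1 := by omega
            simp [h2, h3]

theorem pvInv_row (lock : List String) (W m : Nat) (st : List Int × List Bool)
    (h : pvInv lock W m st) :
    pvInv lock W (m + 1) ((List.range W).foldl (pvStepB lock (1 + m)) st) := by
  have := pvStepB_row lock W m st h W (le_refl W)
  simp only at this
  obtain ⟨h1, h2, h3, h4⟩ := this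
  refine ⟨h1, h2, ?_, ?_⟩
  · intro c hc; rw [h3 c hc]; simp [hc]
  · intro i hi
    rw [h4 i hi]
    by_cases hiW : i < W
    · simp [hiW]
    · have h2 : ¬ i < W := hiW
      simp only [h2, if_false]
      unfold pvPinVal
      simp [h2]

theorem pvInv_outer (lock : List String) (W : Nat) :
    ∀ m : Nat,
      pvInv lock W m
        ((List.range m).foldl (fun st k => (List.range W).foldl (pvStepB lock (1 + k)) st)
          (List.replicate 5 0, List.replicate W false)) := by
  intro m
  induction m with
  | zero =>
    refine ⟨by simp, by simp, ?_, ?_⟩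
    · intro c hc
      simp only [List.range_zero, List.foldl_nil, pvFindDot]
      rw [List.getD_eq_getElem?_getD, List.getElem?_replicate]
      split <;> rfl
    · intro i hi
      simp only [List.range_zero, List.foldl_nil]
      unfold pvPinVal
      simp only [pvFindDot]
      rw [List.getD_eq_getElem?_getD, List.getElem?_replicate]
      split <;> split <;> rfl
  | succ m ih =>
    rw [List.range_succ, List.foldl_append, List.foldl_cons, List.foldl_nil]
    exact pvInv_row lock W m _ ih

-- spec fold, pointwise
theorem pvSpecFold_aux (lock : List String) (M : Nat) :
    ∀ j : Nat,
      (let pins := (List.range j).foldl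
        (fun pins c =>
          match pvFindDot lock c 1 M with
          | some v => pins.set c ((v : Int) - 1)
          | none => pins)
        (List.replicate 5 0 : List Int)
       pins.length = 5 ∧
       ∀ i, i < 5 → pins.getD i 0 =
         if i < j then
           (match pvFindDot lock i 1 M with
            | some v => (v : Int) - 1
            | none => 0)
         else 0) := by
  intro j
  induction j with
  | zero =>
    refine ⟨by simp, ?_⟩
    intro i hi
    simp only [List.range_zero, List.foldl_nil, Nat.not_lt_zero, if_false]
    rw [List.getD_eq_getElem?_getD, List.getElem?_replicate]
    split <;> rfl
  | succ j ih
  =>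
    obtain ⟨hl, hp⟩ := ih
    simp only [List.range_succ, List.foldl_append, List.foldl_cons, List.foldl_nil] at *
    set pins := (List.range j).foldl
        (fun pins c =>
          match pvFindDot lock c 1 M with
          | some v => pins.set c ((v : Int) - 1)
          | none => pins)
        (List.replicate 5 0 : List Int) with hpins
    cases hdot : pvFindDot lock j 1 M with
    | none =>
      refine ⟨hl, ?_⟩
      intro i hi
      rw [hp i hi]
      rcases eq_or_ne i j with hij | hij
      · subst hij
        simp [hdot]
      · rcases Nat.lt_or_ge i j with h1 | h1
        · simp [h1, Nat.lt_succ_of_lt h1]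
        · have h2 : ¬ i < j := by omega
          have h3 : ¬ i < j + 1 := by omega
          simp [h2, h3]
    | some v =>
      refine ⟨by simp [hl], ?_⟩
      intro i hi
      rcases eq_or_ne i j with hij | hij
      · subst hij
        rw [pv_getD_set_self _ _ _ _ (by omega : i < pins.length)]
        simp [hdot]
      · rw [pv_getD_set_ne _ _ _ _ _ (Ne.symm hij), hp i hi]
        rcases Nat.lt_or_ge i j with h1 | h1
        · simp [h1, Nat.lt_succ_of_lt h1]
        · have h2 : ¬ i < j := by omega
          have h3 : ¬ i < j + 1 := by omega
          simp [h2, h3]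

theorem pvSpecFold_length (lock : List String) : (pvSpecFold lock).length = 5 := by
  unfold pvSpecFold
  exact (pvSpecFold_aux lock (lock.length - 1) ((lock.getD 0 "").toList.length)).1

theorem pvSpecFold_getD (lock : List String) (i : Nat) (hi : i < 5) :
    (pvSpecFold lock).getD i 0 =
      pvPinVal lock ((lock.getD 0 "").toList.length) i (lock.length - 1) := by
  unfold pvSpecFold pvPinVal
  rw [(pvSpecFold_aux lock (lock.length - 1) ((lock.getD 0 "").toList.length)).2 i hi]

-- B's port reduced to the Nat-indexed fold
theorem calc_pins_lock_alt_eq_fold (lock : List String) :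
    calc_pins_lock_alt lock =
      ((List.range (lock.length - 1)).foldl
        (fun st k => (List.range ((lock.getD 0 "").toList.length)).foldl
          (pvStepB lock (1 + k)) st)
        (List.replicate 5 0, List.replicate ((lock.getD 0 "").toList.length) false)).1 := by
  have hs : ((PySem.List.pyGet? lock 0).getD "") = lock.getD 0 "" := by
    simp [PySem.List.pyGet?_zero, List.getD_eq_getElem?_getD]
  simp only [calc_pins_lock_alt]
  rw [hs, PySem.Str.len_eq]
  simp only [Int.toNat_natCast, Int.ofNat_eq_natCast]
  rw [PySem.List.pyRange_zero_natCast]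
  rw [PySem.List.pyRange_one]
  have hn : ((lock.length : Int) - 1).toNat = lock.length - 1 := by omega
  rw [hn]
  simp only [List.foldl_map]
  congr 1
  apply PySem.List.foldl_congr_mem
  intro st k _
  apply PySem.List.foldl_congr_mem
  intro st' c _
  unfold pvStepB
  have h1 : (1 + (k : Int)) = ((1 + k : Nat) : Int) := by push_cast; ring
  have hchr : ((PySem.Str.pyGet? ((PySem.List.pyGet? lock (1 + (k : Int))).getD "") (c : Int)).getD ' ')
      = pvChr lock (1 + k) c := by
    rw [h1, PySem.List.pyGet?_natCast]
    simp [pvChr, List.getD_eq_getElem?_getD]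
  rw [hchr]
  have htoNat : ((c : Int)).toNat = c := by simp
  rw [htoNat]
  have hval : (1 + (k : Int)) - 1 = ((1 + k : Nat) : Int) - 1 := by rw [h1]
  rw [hval]

theorem calc_pins_lock_alt_eq_spec (lock : List String) :
    calc_pins_lock_alt lock = pvSpecFold lock := by
  rw [calc_pins_lock_alt_eq_fold]
  set W := (lock.getD 0 "").toList.length with hW
  have hinv := pvInv_outer lock W (lock.length - 1)
  obtain ⟨hl1, _, _, hpin⟩ := hinv
  apply List.ext_getElem
  · rw [hl1, pvSpecFold_length]
  · intro i h1 h2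
    have hi5 : i < 5 := by rw [pvSpecFold_length] at h2; exact h2
    have ha := hpin i hi5
    have hb := pvSpecFold_getD lock i hi5
    rw [List.getD_eq_getElem _ 0 h1] at ha
    rw [List.getD_eq_getElem _ 0 h2] at hb
    rw [ha, hb]

-- ===== VERDICT (by name: the statement is the Claim_ definition above) =====
theorem calc_pins_lock_spec : Claim_equal_calc_pins_lock := by
  intro lock _ _
  unfold Spec_calc_pins_lock
  rw [calc_pins_lock_eq_spec, calc_pins_lock_alt_eq_spec]
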